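-- pv_equiv track=rewrite | github.com/zouningmu/Dueling_DQN_for_BSIM | project/gym_bsim/DQN_training.py | optimize_actions
-- ===== SOURCE A (Python) =====
-- def optimize_actions(buffer):
--     actions = list(buffer)
--     optimized_actions = []
--     i = 0
--     while i < len(actions):
--         current = actions[i]
--         if current % 2 == 0:
--             target = current + 1
--         else:
--             target = current - 1
--
--         if target in actions[i + 1:]:
--             actions.remove(current)
--             actions.remove(target)
--         else:
--             optimized_actions.append(current)
--             i += 1
--
--     return optimized_actions[:15]
-- ===== SOURCE B (Python) =====
-- def optimize_actions(buffer):
--     actions = list(buffer)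
--     counts = {}
--     for v in actions:
--         counts[v] = counts.get(v, 0) + 1
--     quota = {}
--     for v, c in counts.items():
--         partner = v + 1 if v % 2 == 0 else v - 1
--         quota[v] = max(0, c - counts.get(partner, 0))
--     kept = []
--     for v in reversed(actions):
--         if quota[v] > 0:
--             quota[v] -= 1
--             kept.append(v)
--     kept.reverse()
--     return kept[:15]
-- ===== Notes on version B (the rewrite author's own statement) =====
-- stated objective: faster
-- what changed: Replaced the quadratic mutate-while-scanning loop (slice membership test plus two list.remove calls per step) by a single counting pass: a Counter of all values, a per-value surviving quota max(0, count[v]-count[partner]), and one reverse pass that keeps the last quota occurrences of each value, restoring order and slicing to 15.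
import Mathlib
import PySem

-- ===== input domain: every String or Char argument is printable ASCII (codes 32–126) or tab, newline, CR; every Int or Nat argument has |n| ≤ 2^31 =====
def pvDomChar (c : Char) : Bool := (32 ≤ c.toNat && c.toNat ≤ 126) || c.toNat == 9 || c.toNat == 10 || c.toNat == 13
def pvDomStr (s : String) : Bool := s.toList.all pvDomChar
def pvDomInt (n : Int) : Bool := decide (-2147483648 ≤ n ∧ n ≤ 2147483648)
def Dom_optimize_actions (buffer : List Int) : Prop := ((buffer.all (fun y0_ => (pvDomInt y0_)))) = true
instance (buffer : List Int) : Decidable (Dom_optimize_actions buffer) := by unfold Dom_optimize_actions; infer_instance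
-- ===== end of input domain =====

-- B replaces A's quadratic remove-while-scanning loop by one counting pass (Counter + per-value
-- surviving quota + reverse collection pass): same return value, O(n) instead of O(n^2).


-- ===== PORT A =====
-- 'target = current + 1 if current % 2 == 0 else current - 1' (shared verbatim by both Pythons)
def pyPartner (v : Int) : Int := if PySem.Int.mod v 2 = 0 then v + 1 else v - 1

-- The while loop of A: state (actions, optimized_actions, i).  'x in actions[i+1:]' is membership
-- in List.drop (i+1) (nonnegative slice bound); 'actions.remove(x)' is List.erase (exact here:
-- x is always present, so Python's ValueError is unreachable).
def optActionsLoop (actions optimized : List Int) (i : Nat) : List Int :=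
  if h : i < actions.length then
    -- current := actions[i] and target := pyPartner current, inlined
    if pyPartner actions[i] ∈ actions.drop (i + 1) then
      optActionsLoop ((actions.erase actions[i]).erase (pyPartner actions[i])) optimized i
    else
      optActionsLoop actions (optimized ++ [actions[i]]) (i + 1)
  else optimized
termination_by actions.length - i
decreasing_by
  · have hm : actions[i] ∈ actions := List.getElem_mem h
    have h1 : (actions.erase actions[i]).length = actions.length - 1 :=
      List.length_erase_of_mem hm
    have h2 : ((actions.erase actions[i]).erase (pyPartner actions[i])).length
        ≤ (actions.erase actions[i]).length := List.length_erase_le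
    omega
  · omega

-- 'optimized_actions[:15]' is take 15 (nonnegative literal bound)
def optimize_actions (buffer : List Int) : List Int :=
  (optActionsLoop buffer [] 0).take 15

-- ===== PORT B =====
def optimize_actions_alt (buffer : List Int) : List Int :=
  let actions := buffer
  -- counts[v] = counts.get(v, 0) + 1
  let counts : PySem.Dict Int Int :=
    actions.foldl (fun d v => d.insert v (d.getD v 0 + 1)) PySem.Dict.empty
  -- quota[v] = max(0, c - counts.get(partner, 0)) for (v, c) in counts.items()
  let quota : PySem.Dict Int Int :=
    counts.items.foldl (fun q vc => q.insert vc.1 (max 0 (vc.2 - counts.getD (pyPartner vc.1) 0)))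
      PySem.Dict.empty
  -- reverse pass: keep v while quota[v] > 0, decrementing (quota[v] lookup is getD: v is always a key)
  let st :=
    actions.reverse.foldl
      (fun (st : PySem.Dict Int Int × List Int) v =>
        if st.1.getD v 0 > 0 then (st.1.insert v (st.1.getD v 0 - 1), st.2 ++ [v]) else st)
      (quota, [])
  -- kept.reverse(); return kept[:15]
  st.2.reverse.take 15

-- ===== PRECONDITION & SPEC =====
def Spec_optimize_actions (buffer : List Int) (out : List Int) : Prop := out = optimize_actions_alt buffer
instance (buffer : List Int) (out : List Int) : Decidable (Spec_optimize_actions buffer out) := by unfold Spec_optimize_actions; infer_instance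

-- ===== CLAIM (what is proved, stated in full; the proofs are below) =====
def Claim_equal_optimize_actions : Prop := ∀ (buffer : List Int), Dom_optimize_actions buffer → Spec_optimize_actions buffer (optimize_actions buffer)

-- ===== LEMMAS AND PROOFS =====

theorem pyPartner_ne (v : Int) : pyPartner v ≠ v := by
  unfold pyPartner; split <;> omega

theorem pyPartner_pyPartner (v : Int) : pyPartner (pyPartner v) = v := by
  unfold pyPartner
  rw [PySem.Int.mod_eq_emod_of_pos (by norm_num),
      PySem.Int.mod_eq_emod_of_pos (by norm_num)]
  split <;> split <;> omega

-- A's loop as a pure recursion over the unprocessed suffix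
def goA : List Int → List Int
  | [] => []
  | c :: t => if pyPartner c ∈ t then goA (t.erase (pyPartner c)) else c :: goA t
termination_by l => l.length
decreasing_by
  · have : (t.erase (pyPartner c)).length ≤ t.length := List.length_erase_le; simp; omega
  · simp

-- forward filter: keep an occurrence of v iff its suffix-count stays within quota q v
def kl (q : Int → Nat) : List Int → List Int
  | [] => []
  | v :: t => if t.count v + 1 ≤ q v then v :: kl q t else kl q t

-- reverse-pass collector (B's loop, functionally)
def rk (q : Int → Nat) : List Int → List Int
  | [] => []
  | v :: t => if 0 < q v then v :: rk (Function.update q v (q v - 1)) t else rk q t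

def qf (l : List Int) (v : Int) : Nat := l.count v - l.count (pyPartner v)

theorem kl_congr (l : List Int) : ∀ q q' : Int → Nat,
    (∀ v ∈ l, min (q v) (l.count v) = min (q' v) (l.count v)) → kl q l = kl q' l := by
  induction l with
  | nil => intro q q' _; rfl
  | cons c t ih =>
    intro q q' h
    have hc := h c (List.mem_cons_self ..)
    rw [List.count_cons_self] at hc
    have ht : kl q t = kl q' t := by
      apply ih
      intro v hv
      have hvl := h v (List.mem_cons_of_mem c hv)
      by_cases hvc : v = c
      · subst hvc; rw [List.count_cons_self] at hvl; omega
      · have hcv : ¬ (c = v) := fun h => hvc h.symm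
        simp only [List.count_cons, beq_iff_eq, hcv, if_false, Nat.add_zero] at hvl
        exact hvl
    simp only [kl, ht]
    split_ifs <;> first | rfl | omega

theorem kl_erase_drop (t : List Int) : ∀ (q : Int → Nat) (p : Int), p ∈ t → q p < t.count p →
    kl q t = kl q (t.erase p) := by
  induction t with
  | nil => intro q p hp _; cases hp
  | cons x r ih =>
    intro q p hp hq
    by_cases hxp : x = p
    · subst hxp
      rw [List.erase_cons_head]
      rw [List.count_cons_self] at hq
      simp only [kl]
      rw [if_neg (by omega)]
    · have hp' : p ∈ r := by
        rcases List.mem_cons.mp hp with h | h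
        · exact absurd h.symm hxp
        · exact h
      simp only [List.count_cons, beq_iff_eq, hxp, if_false, Nat.add_zero] at hq
      rw [List.erase_cons_tail (by simpa using hxp)]
      simp only [kl, List.count_erase_of_ne hxp]
      rw [ih q p hp' hq]

theorem kl_append_singleton (t : List Int) : ∀ (q : Int → Nat) (v : Int),
    kl q (t ++ [v]) = kl (Function.update q v (q v - 1)) t ++ (if 1 ≤ q v then [v] else []) := by
  induction t with
  | nil => intro q v; simp [kl]
  | cons x r ih =>
    intro q v
    by_cases hxv : x = v
    · subst hxv
      simp only [List.cons_append, kl, List.count_append, List.count_singleton_self,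
        Function.update_self, ih]
      split_ifs <;> first | rfl | omega
    · have hcnt : List.count x [v] = 0 := by
        simp [(show ¬ (v = x) from fun h => hxv h.symm)]
      simp only [List.cons_append, kl, List.count_append, hcnt, Nat.add_zero,
        Function.update_of_ne hxv, ih]
      split_ifs <;> rfl

theorem rk_congr (m : List Int) : ∀ q q' : Int → Nat, (∀ v ∈ m, q v = q' v) → rk q m = rk q' m := by
  induction m with
  | nil => intro _ _ _; rfl
  | cons v m' ih =>
    intro q q' h
    have hv := h v (List.mem_cons_self ..)
    simp only [rk, hv]
    by_cases h0 : 0 < q' v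
    · rw [if_pos h0, if_pos h0]
      congr 1
      apply ih
      intro w hw
      by_cases hwv : w = v
      · subst hwv; simp [Function.update_self]
      · simp [Function.update_of_ne hwv, h w (List.mem_cons_of_mem v hw)]
    · rw [if_neg h0, if_neg h0]
      exact ih _ _ (fun w hw => h w (List.mem_cons_of_mem v hw))

theorem optActionsLoop_eq_aux : ∀ (n : Nat) (suf : List Int), suf.length ≤ n →
    ∀ (pre : List Int), (∀ v ∈ pre, pyPartner v ∉ suf) →
    optActionsLoop (pre ++ suf) pre pre.length = pre ++ goA suf := by
  intro n
  induction n with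
  | zero =>
    intro suf hs pre _
    have : suf = [] := List.eq_nil_of_length_eq_zero (by omega)
    subst this
    rw [optActionsLoop]
    simp [goA]
  | succ n ih =>
    intro suf hs pre hinv
    match suf with
    | [] =>
      rw [optActionsLoop]
      simp [goA]
    | c :: t =>
      have hlt : t.length ≤ n := by simp at hs; omega
      have hlen : pre.length < (pre ++ c :: t).length := by simp
      have hget : (pre ++ c :: t)[pre.length]'hlen = c := by
        rw [List.getElem_append_right (le_refl _)]
        simp
      have hdrop : (pre ++ c :: t).drop (pre.length + 1) = t := by
        rw [show pre ++ c :: t = (pre ++ [c]) ++ t by simp,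
            List.drop_left' (by simp)]
      rw [optActionsLoop, dif_pos hlen]
      simp only [hget, hdrop]
      by_cases hmem : pyPartner c ∈ t
      · rw [if_pos hmem]
        have hcpre : c ∉ pre := fun hc =>
          hinv c hc (List.mem_cons_of_mem c hmem)
        have htpre : pyPartner c ∉ pre := fun hpp =>
          hinv _ hpp (by rw [pyPartner_pyPartner]; exact List.mem_cons_self ..)
        have e1 : (pre ++ c :: t).erase c = pre ++ t := by
          rw [List.erase_append_right _ hcpre, List.erase_cons_head]
        have e2 : (pre ++ t).erase (pyPartner c) = pre ++ t.erase (pyPartner c) :=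
          List.erase_append_right _ htpre
        rw [e1, e2]
        have hinv' : ∀ v ∈ pre, pyPartner v ∉ t.erase (pyPartner c) := fun v hv hmem' =>
          hinv v hv (List.mem_cons_of_mem c (List.mem_of_mem_erase hmem'))
        rw [ih (t.erase (pyPartner c)) (le_trans List.length_erase_le hlt) pre hinv']
        simp only [goA]
        rw [if_pos hmem]
      · rw [if_neg hmem]
        have hinv'' : ∀ v ∈ pre ++ [c], pyPartner v ∉ t := by
          intro v hv
          rcases List.mem_append.mp hv with h | h
          · exact fun hm => hinv v h (List.mem_cons_of_mem c hm)
          · rw [List.mem_singleton.mp h]; exact hmem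
        rw [show pre ++ c :: t = (pre ++ [c]) ++ t by simp,
            show pre.length + 1 = (pre ++ [c]).length by simp,
            ih t hlt (pre ++ [c]) hinv'']
        simp only [goA]
        rw [if_neg hmem, List.append_assoc, List.singleton_append]

theorem optActionsLoop_eq (suf : List Int) : ∀ (pre : List Int),
    (∀ v ∈ pre, pyPartner v ∉ suf) →
    optActionsLoop (pre ++ suf) pre pre.length = pre ++ goA suf :=
  fun pre h => optActionsLoop_eq_aux suf.length suf le_rfl pre h

theorem pyPartner_inj (a b : Int) (h : pyPartner a = pyPartner b) : a = b := by
  rw [← pyPartner_pyPartner a, h, pyPartner_pyPartner]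

theorem goA_eq_kl_aux : ∀ (n : Nat) (l : List Int), l.length ≤ n → goA l = kl (qf l) l := by
  intro n
  induction n with
  | zero =>
    intro l hl
    have : l = [] := List.eq_nil_of_length_eq_zero (by omega)
    subst this; simp [goA, kl]
  | succ n ih =>
    intro l hl
    match l with
    | [] => simp [goA, kl]
    | c :: t =>
      have hlt : t.length ≤ n := by simp at hl; omega
      have hpc : ¬ (pyPartner c = c) := pyPartner_ne c
      have hcp : ¬ (c = pyPartner c) := fun h => hpc h.symm
      have hinv : pyPartner (pyPartner c) = c := pyPartner_pyPartner c
      by_cases hp : pyPartner c ∈ t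
      · have hcnt1 : 1 ≤ t.count (pyPartner c) := List.count_pos_iff.mpr hp
        have hqf : ∀ v, qf (c :: t) v = qf (t.erase (pyPartner c)) v := by
          intro v
          by_cases hvc : v = c
          · subst hvc
            simp only [qf, List.count_cons, List.count_erase, beq_iff_eq]
            split_ifs <;> omega
          · by_cases hvp : v = pyPartner c
            · subst hvp
              simp only [qf, List.count_cons, List.count_erase, beq_iff_eq, hinv]
              split_ifs; omega
            · have h1 : ¬ (c = pyPartner v) := by
                intro h; apply hvp; rw [h, pyPartner_pyPartner]
              have h2 : ¬ (pyPartner c = pyPartner v) := by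
                intro h; exact hvc (pyPartner_inj c v h).symm
              have h3 : ¬ (pyPartner c = v) := fun h => hvp h.symm
              have h4 : ¬ (c = v) := fun h => hvc h.symm
              simp only [qf, List.count_cons, List.count_erase, beq_iff_eq]
              split_ifs; omega
        have hdrop : qf (c :: t) (pyPartner c) < t.count (pyPartner c) := by
          simp only [qf, List.count_cons, beq_iff_eq, hinv]
          split_ifs; omega
        have hhead : ¬ (t.count c + 1 ≤ qf (c :: t) c) := by
          simp only [qf, List.count_cons, beq_iff_eq]
          split_ifs <;> omega
        have hlen' : (t.erase (pyPartner c)).length ≤ n := le_trans List.length_erase_le hlt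
        calc goA (c :: t) = goA (t.erase (pyPartner c)) := by
              simp only [goA]; rw [if_pos hp]
          _ = kl (qf (t.erase (pyPartner c))) (t.erase (pyPartner c)) := ih _ hlen'
          _ = kl (qf (c :: t)) (t.erase (pyPartner c)) := by rw [funext hqf]
          _ = kl (qf (c :: t)) t := (kl_erase_drop t _ _ hp hdrop).symm
          _ = kl (qf (c :: t)) (c :: t) := by
              simp only [kl]; rw [if_neg hhead]
      · have hc0 : t.count (pyPartner c) = 0 := List.count_eq_zero.mpr hp
        have hhead : t.count c + 1 ≤ qf (c :: t) c := by
          simp only [qf, List.count_cons, beq_iff_eq]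
          split_ifs <;> omega
        have hcongr : kl (qf (c :: t)) t = kl (qf t) t := by
          apply kl_congr
          intro v hv
          by_cases hvc : v = c
          · subst hvc
            simp only [qf, List.count_cons, beq_iff_eq]
            split_ifs <;> omega
          · have h1 : ¬ (pyPartner v = c) := by
              intro h
              exact hp (by rw [← h, pyPartner_pyPartner]; exact hv)
            have h2 : ¬ (c = pyPartner v) := fun h => h1 h.symm
            have h4 : ¬ (c = v) := fun h => hvc h.symm
            simp only [qf, List.count_cons, beq_iff_eq]
            split_ifs; omega
        calc goA (c :: t) = c :: goA t := by simp only [goA]; rw [if_neg hp]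
          _ = c :: kl (qf t) t := by rw [ih t hlt]
          _ = c :: kl (qf (c :: t)) t := by rw [hcongr]
          _ = kl (qf (c :: t)) (c :: t) := by
              simp only [kl]; rw [if_pos hhead]

theorem goA_eq_kl (l : List Int) : goA l = kl (qf l) l :=
  goA_eq_kl_aux l.length l le_rfl

theorem rk_reverse_eq_kl (m : List Int) : ∀ q : Int → Nat,
    (rk q m).reverse = kl q m.reverse := by
  induction m with
  | nil => intro q; rfl
  | cons v m' ih =>
    intro q
    simp only [rk, List.reverse_cons]
    rw [kl_append_singleton]
    by_cases h : 0 < q v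
    · rw [if_pos h, if_pos (by omega), List.reverse_cons, ih]
    · rw [if_neg h, if_neg (by omega), ih]
      have hupd : Function.update q v (q v - 1) = q := by
        have h0 : q v - 1 = q v := by omega
        rw [h0]; exact Function.update_eq_self v q
      rw [hupd, List.append_nil]

theorem getD_foldl_insert_fun (K : List Int) (g : Int → Int) :
    ∀ (d : PySem.Dict Int Int) (v : Int),
    (K.foldl (fun q k => q.insert k (g k)) d).getD v 0 = if v ∈ K then g v else d.getD v 0 := by
  induction K with
  | nil => intro d v; simp
  | cons k K' ih =>
    intro d v
    rw [List.foldl_cons, ih]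
    by_cases hv : v ∈ K'
    · simp [hv, List.mem_cons]
    · rw [PySem.Dict.getD_insert]
      by_cases hvk : v = k <;> simp [hv, hvk, List.mem_cons]

theorem foldl_rk (xs : List Int) :
    ∀ (d : PySem.Dict Int Int) (acc : List Int),
    (xs.foldl (fun (st : PySem.Dict Int Int × List Int) v =>
        if st.1.getD v 0 > 0 then (st.1.insert v (st.1.getD v 0 - 1), st.2 ++ [v]) else st)
      (d, acc)).2 = acc ++ rk (fun v => (d.getD v 0).toNat) xs := by
  induction xs with
  | nil => intro d acc; simp [rk]
  | cons v xs' ih =>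
    intro d acc
    rw [List.foldl_cons]
    by_cases h : d.getD v 0 > 0
    · rw [if_pos h, ih]
      have hq : (fun w => ((d.insert v (d.getD v 0 - 1)).getD w 0).toNat)
          = Function.update (fun w => (d.getD w 0).toNat) v ((d.getD v 0).toNat - 1) := by
        funext w
        rw [PySem.Dict.getD_insert]
        by_cases hw : w = v
        · subst hw; rw [if_pos rfl, Function.update_self]; omega
        · rw [if_neg hw, Function.update_of_ne hw]
      rw [hq]
      simp only [rk]
      rw [if_pos (show 0 < (d.getD v 0).toNat by omega)]
      simp
    · rw [if_neg h, ih]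
      simp only [rk]
      rw [if_neg (show ¬ 0 < (d.getD v 0).toNat by omega)]

theorem alt_eq_rk (buffer : List Int) :
    optimize_actions_alt buffer = (rk (qf buffer) buffer.reverse).reverse.take 15 := by
  simp only [optimize_actions_alt]
  rw [PySem.Dict.foldl_insert_getD_add_one_eq_counter,
      PySem.Dict.items_counter, List.foldl_map, foldl_rk, List.nil_append]
  have hrk : rk (fun v =>
      (((PySem.Set.ofList buffer).foldl
          (fun (q : PySem.Dict Int Int) (k : Int) => q.insert k (max 0 ((buffer.count k : Int) -
            (PySem.Dict.counter buffer).getD (pyPartner k) 0)))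
          PySem.Dict.empty).getD v 0).toNat) buffer.reverse
      = rk (qf buffer) buffer.reverse := by
    apply rk_congr
    intro v hv
    rw [getD_foldl_insert_fun, if_pos ((PySem.Set.mem_ofList _ _).mpr (List.mem_reverse.mp hv)),
        PySem.Dict.getD_counter]
    unfold qf
    omega
  rw [hrk]

-- ===== VERDICT (by name: the statement is the Claim_ definition above) =====
theorem optimize_actions_spec : Claim_equal_optimize_actions := by
  intro buffer _
  unfold Spec_optimize_actions optimize_actions
  rw [alt_eq_rk, rk_reverse_eq_kl, List.reverse_reverse, ← goA_eq_kl]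
  have h := optActionsLoop_eq buffer [] (by simp)
  simpa using (congrArg (List.take 15) h.symm).symm
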